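-- pv_equiv track=rewrite | github.com/TetianaHrunyk/DailyCodingProblems | challenge122.py | get_max_coins
-- ===== SOURCE A (Python) =====
-- def driver(board, a=0, b=0, cur_sum = 0):
--     if a >= (len(board)-1) or b >= (len(board[0])-1):
--         cur_sum += board[a][b]
--         return cur_sum
--     cur_sum += board[a][b]
--     a1 = a+1
--     b1 = b+1
--     return max(driver(board, a1, b1, cur_sum), driver(board, a1, b, cur_sum), driver(board, a, b1, cur_sum))
--
-- def get_max_coins(board):
--     a = len(board)
--     b = len(board[0])
--     if a > b:
--         to_add = a-b
--         for row in board: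
--             for _ in range(to_add):
--                 row.append(0)
--     if b > a:
--         to_add = b-a
--         for _ in range(to_add):
--             board.append([0 for _ in range(b)])
--     return driver(board)
-- ===== SOURCE B (Python) =====
-- # Bottom-up DP over the (conceptually) zero-padded square board: O(n^2) instead of
-- # A's exponential branching recursion. Return value only: A pads `board` in place, B does not mutate it.
-- def get_max_coins(board):
--     rows = len(board)
--     w = len(board[0])
--     n = max(rows, w)
--
--     def cell(i, j):
--         if i >= rows:
--             return 0
--         row = board[i]
--         return row[j] if j < len(row) else 0
--
--     dp = [0] * n
--     for i in range(n - 1, -1, -1):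
--         new = [0] * n
--         for j in range(n - 1, -1, -1):
--             if i == n - 1 or j == n - 1:
--                 new[j] = cell(i, j)
--             else:
--                 new[j] = cell(i, j) + max(dp[j + 1], dp[j], new[j + 1])
--         dp = new
--     return dp[0]
-- ===== Notes on version B (the rewrite author's own statement) =====
-- stated objective: faster
-- what changed: Replaced A's exponential three-way branching recursion over the padded square board by a bottom-up dynamic program that fills one row of best-path values at a time (reading the board through a bounds-checked cell accessor instead of physically padding it), O(n^2) instead of O(3^n).
import Mathlib
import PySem

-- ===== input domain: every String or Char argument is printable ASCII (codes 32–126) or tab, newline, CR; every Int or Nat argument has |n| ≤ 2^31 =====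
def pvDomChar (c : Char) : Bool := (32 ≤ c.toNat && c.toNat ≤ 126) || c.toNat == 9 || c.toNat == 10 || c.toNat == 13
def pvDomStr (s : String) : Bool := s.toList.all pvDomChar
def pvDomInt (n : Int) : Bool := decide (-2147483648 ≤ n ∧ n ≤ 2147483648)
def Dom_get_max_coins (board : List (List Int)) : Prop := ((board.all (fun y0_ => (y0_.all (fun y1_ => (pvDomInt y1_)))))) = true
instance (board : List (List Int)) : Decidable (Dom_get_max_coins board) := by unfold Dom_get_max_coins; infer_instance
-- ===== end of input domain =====

-- B replaces A's exponential 3-way branching recursion by a bottom-up O(n^2) DP (return value only: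
-- the Python A pads `board` in place, B does not mutate its argument).

-- ===== PORT A =====
-- A's recursive helper `driver`; Option-valued: `none` is exactly Python's IndexError (excluded by Pre_).
def pvDriver (board : List (List Int)) (a b : Nat) (cur_sum : Int) : Option Int :=
  if h : board.length ≤ a + 1 ∨ (board.headI).length ≤ b + 1 then
    -- Python: a >= len(board)-1 or b >= len(board[0])-1  (over Int; equivalent to the Nat form above)
    (PySem.List.pyGet? board (a : Int)).bind fun row =>
    (PySem.List.pyGet? row (b : Int)).bind fun v => some (cur_sum + v)
  else
    (PySem.List.pyGet? board (a : Int)).bind fun row =>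
    (PySem.List.pyGet? row (b : Int)).bind fun v =>
      (pvDriver board (a+1) (b+1) (cur_sum + v)).bind fun x =>
      (pvDriver board (a+1) b (cur_sum + v)).bind fun y =>
      (pvDriver board a (b+1) (cur_sum + v)).bind fun z =>
      some (max (max x y) z)
termination_by (board.length - a) + ((board.headI).length - b)
decreasing_by all_goals (rw [not_or] at h; omega)

-- A's in-place padding of `board` (the two `if` blocks of get_max_coins), as a value.
def pvPad (board : List (List Int)) (a b : Nat) : List (List Int) :=
  let board1 :=
    if b < a then
      board.map (fun row =>
        (PySem.List.pyRange 0 ((a : Int) - (b : Int)) 1).foldl (fun r _ => r ++ [(0 : Int)]) row)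
    else board
  if a < b then
    (PySem.List.pyRange 0 ((b : Int) - (a : Int)) 1).foldl
      (fun bd _ => bd ++ [(PySem.List.pyRange 0 (b : Int) 1).map (fun _ => (0 : Int))]) board1
  else board1

def get_max_coins (board : List (List Int)) : Int :=
  match board.head? with
  | none => 0  -- Python raises IndexError at `len(board[0])` here; excluded by Pre_
  | some row0 => (pvDriver (pvPad board board.length row0.length) 0 0 0).getD 0

-- ===== PORT B =====
-- B's bounds-checked cell accessor (Python `cell`): indices it is called with are in range, so getD is exact.
def pvCell (board : List (List Int)) (rows : Nat) (i j : Nat) : Int :=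
  if rows ≤ i then 0
  else
    let row := board.getD i []
    if j < row.length then row.getD j 0 else 0

-- B's inner loop `for j in range(n-1,-1,-1)`: fuel = next index + 1, acc = entries j+1..n-1 (new[j+1] = acc.headI).
def pvRow (board : List (List Int)) (rows n i : Nat) (dp : List Int) : Nat → List Int → List Int
  | 0, acc => acc
  | j+1, acc =>
      let v := if i = n - 1 ∨ j = n - 1 then pvCell board rows i j
               else pvCell board rows i j + max (max (dp.getD (j+1) 0) (dp.getD j 0)) acc.headI
      pvRow board rows n i dp j (v :: acc)

-- B's outer loop `for i in range(n-1,-1,-1)`: fuel = next row index + 1.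
def pvDP (board : List (List Int)) (rows n : Nat) : Nat → List Int → List Int
  | 0, dp => dp
  | i+1, dp => pvDP board rows n i (pvRow board rows n i dp n [])

def get_max_coins_alt (board : List (List Int)) : Int :=
  let rows := board.length
  let w := (board.headI).length  -- Python `len(board[0])`: raises on [], excluded by Pre_
  let n := max rows w
  (pvDP board rows n n (List.replicate n 0)).headI  -- dp[0]; n ≥ 1 under Pre_

-- ===== PRECONDITION & SPEC =====
-- Pre_ is exactly where Python A returns: it raises IndexError on the empty board and on ragged
-- boards having a row shorter than the first row (driver then indexes past that row's end).
def Pre_get_max_coins (board : List (List Int)) : Prop :=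
  board ≠ [] ∧ ∀ row ∈ board, (board.headI).length ≤ row.length
instance (board : List (List Int)) : Decidable (Pre_get_max_coins board) := by
  unfold Pre_get_max_coins; infer_instance

def pvWitness_get_max_coins : List (List Int) := [[1, 2], [3, 4]]

def Spec_get_max_coins (board : List (List Int)) (out : Int) : Prop := out = get_max_coins_alt board
instance (board : List (List Int)) (out : Int) : Decidable (Spec_get_max_coins board out) := by
  unfold Spec_get_max_coins; infer_instance

-- ===== CLAIM (what is proved, stated in full; the proofs are below) =====
def Claim_equal_get_max_coins : Prop := ∀ (board : List (List Int)), Dom_get_max_coins board → Pre_get_max_coins board → Spec_get_max_coins board (get_max_coins board)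

-- ===== LEMMAS AND PROOFS =====

-- The common value function: best path sum from (a,b) on the n×n board read through `cell`,
-- stopping (A's base case) as soon as the last row or column is reached.
def pvV (cell : Nat → Nat → Int) (n : Nat) (a b : Nat) : Int :=
  if n ≤ a + 1 ∨ n ≤ b + 1 then cell a b
  else cell a b + max (max (pvV cell n (a+1) (b+1)) (pvV cell n (a+1) b)) (pvV cell n a (b+1))
termination_by (n - a) + (n - b)
decreasing_by all_goals (simp only [not_or, not_le] at *; omega)

theorem pvV_congr (c1 c2 : Nat → Nat → Int) (n : Nat)
    (h : ∀ i j, i < n → j < n → c1 i j = c2 i j) :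
    ∀ a b, a < n → b < n → pvV c1 n a b = pvV c2 n a b := by
  suffices H : ∀ k a b, (n - a) + (n - b) ≤ k → a < n → b < n → pvV c1 n a b = pvV c2 n a b by
    intro a b ha hb
    exact H ((n - a) + (n - b)) a b le_rfl ha hb
  intro k
  induction k with
  | zero => intro a b hk ha hb; omega
  | succ k ih =>
    intro a b hk ha hb
    conv_lhs => rw [pvV]
    conv_rhs => rw [pvV]
    by_cases hbase : n ≤ a + 1 ∨ n ≤ b + 1
    · rw [if_pos hbase, if_pos hbase]
      exact h a b ha hb
    · rw [if_neg hbase, if_neg hbase, not_or] at *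
      rw [h a b ha hb, ih (a+1) (b+1) (by omega) (by omega) (by omega),
        ih (a+1) b (by omega) (by omega) hb, ih a (b+1) (by omega) ha (by omega)]

theorem foldl_append_const {α β : Type} (l : List β) (c : α) (init : List α) :
    l.foldl (fun r _ => r ++ [c]) init = init ++ List.replicate l.length c := by
  induction l generalizing init with
  | nil => simp
  | cons x xs ih =>
      rw [List.foldl_cons, ih, List.append_assoc, List.singleton_append, List.length_cons,
        List.replicate_succ]

-- padding characterized
theorem pvPad_eq (board : List (List Int)) (a b : Nat) (ha : a = board.length) :
    pvPad board a b =
      if b < a then board.map (· ++ List.replicate (a - b) 0)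
      else board ++ List.replicate (b - a) (List.replicate b 0) := by
  unfold pvPad
  rcases Nat.lt_trichotomy b a with h | h | h
  · simp only [if_pos h, if_neg (by omega : ¬ a < b)]
    refine List.map_congr_left (fun row _ => ?_)
    rw [foldl_append_const, PySem.List.length_pyRange_one]
    congr 2
    omega
  · subst h
    simp
  · simp only [if_neg (by omega : ¬ b < a), if_pos h]
    rw [foldl_append_const, PySem.List.length_pyRange_one]
    have hz : (PySem.List.pyRange 0 (b : Int) 1).map (fun _ => (0 : Int)) = List.replicate b 0 := by
      rw [List.map_const', PySem.List.length_pyRange_one]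
      congr 1
    rw [hz]
    congr 2
    omega

-- A-side: driver computes pvV on the padded board
theorem pvDriver_eq (B : List (List Int)) (n : Nat)
    (hlen : B.length = n) (hhead : (B.headI).length = n)
    (hrow : ∀ i, i < n → n ≤ (B.getD i []).length) :
    ∀ k a b cur, (n - a) + (n - b) ≤ k → a < n → b < n →
      pvDriver B a b cur = some (cur + pvV (fun i j => (B.getD i []).getD j 0) n a b) := by
  intro k
  induction k with
  | zero => intro a b cur hk ha hb; omega
  | succ k ih =>
    intro a b cur hk ha hb
    have hga : PySem.List.pyGet? B (a : Int) = some (B.getD a []) := by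
      rw [PySem.List.pyGet?_natCast, List.getElem?_eq_getElem (by omega),
        List.getD_eq_getElem _ _ (by omega)]
    have hgb : PySem.List.pyGet? (B.getD a []) (b : Int) = some ((B.getD a []).getD b 0) := by
      have hlb : b < (B.getD a []).length := lt_of_lt_of_le hb (hrow a ha)
      rw [PySem.List.pyGet?_natCast, List.getElem?_eq_getElem hlb,
        List.getD_eq_getElem _ _ hlb]
    rw [pvDriver, hlen, hhead]
    by_cases hbase : n ≤ a + 1 ∨ n ≤ b + 1
    · rw [dif_pos hbase]
      simp only [hga, hgb, Option.bind_some]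
      rw [pvV, if_pos hbase]
    · rw [dif_neg hbase]
      rw [not_or] at hbase
      simp only [hga, hgb, Option.bind_some]
      rw [ih (a+1) (b+1) _ (by omega) (by omega) (by omega),
        ih (a+1) b _ (by omega) (by omega) hb,
        ih a (b+1) _ (by omega) ha (by omega)]
      simp only [Option.bind_some]
      conv_rhs => rw [pvV]
      rw [if_neg (by rw [not_or]; exact hbase), max_add_add_left, max_add_add_left, add_assoc]

-- B-side: the inner loop builds one row of pvV values
theorem pvRow_eq (board : List (List Int)) (rows n i : Nat) (dp : List Int)
    (hi : i < n)
    (hdp : i + 1 < n → dp = (List.range n).map (pvV (pvCell board rows) n (i+1))) :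
    ∀ k acc, k ≤ n → acc = (List.range' k (n - k)).map (pvV (pvCell board rows) n i) →
      pvRow board rows n i dp k acc = (List.range n).map (pvV (pvCell board rows) n i) := by
  intro k
  induction k with
  | zero =>
    intro acc _ hacc
    simp only [pvRow, Nat.sub_zero] at hacc ⊢
    rw [List.range_eq_range']
    exact hacc
  | succ k ih =>
    intro acc hk hacc
    have hkn : k < n := by omega
    rw [pvRow]
    by_cases hc : i = n - 1 ∨ k = n - 1
    · rw [if_pos hc]
      refine ih _ (by omega) ?_
      rw [hacc]
      have hr : List.range' k (n - k) = k :: List.range' (k+1) (n - (k+1)) := by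
        have : n - k = (n - (k+1)) + 1 := by omega
        rw [this, List.range'_succ]
      rw [hr, List.map_cons]
      congr 1
      conv_rhs => rw [pvV]
      rw [if_pos (by omega)]
    · rw [if_neg hc]
      rw [not_or] at hc
      have hi1 : i + 1 < n := by omega
      have hk1 : k + 1 < n := by omega
      have hd1 : dp.getD (k+1) 0 = pvV (pvCell board rows) n (i+1) (k+1) := by
        rw [hdp hi1, List.getD_eq_getElem _ _ (by simpa using hk1), List.getElem_map,
          List.getElem_range]
      have hd0 : dp.getD k 0 = pvV (pvCell board rows) n (i+1) k := by
        rw [hdp hi1, List.getD_eq_getElem _ _ (by simpa using hkn), List.getElem_map,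
          List.getElem_range]
      have hh : acc.headI = pvV (pvCell board rows) n i (k+1) := by
        rw [hacc]
        have h2 : n - (k+1) = (n - (k+2)) + 1 := by omega
        rw [h2, List.range'_succ, List.map_cons, List.headI_cons]
      rw [hd1, hd0, hh]
      refine ih _ (by omega) ?_
      have hr : List.range' k (n - k) = k :: List.range' (k+1) (n - (k+1)) := by
        have : n - k = (n - (k+1)) + 1 := by omega
        rw [this, List.range'_succ]
      rw [hacc, hr, List.map_cons]
      congr 1
      conv_rhs => rw [pvV]
      rw [if_neg (by omega)]

-- B-side: the outer loop reaches row 0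
theorem pvDP_eq (board : List (List Int)) (rows n : Nat) (hn : 0 < n) :
    ∀ k dp, k ≤ n → (k < n → dp = (List.range n).map (pvV (pvCell board rows) n k)) →
      pvDP board rows n k dp = (List.range n).map (pvV (pvCell board rows) n 0) := by
  intro k
  induction k with
  | zero =>
    intro dp _ hdp
    simp only [pvDP]
    exact hdp hn
  | succ k ih =>
    intro dp hk hdp
    simp only [pvDP]
    refine ih _ (by omega) ?_
    intro hkn
    apply pvRow_eq board rows n k dp hkn hdp n [] le_rfl
    simp

theorem get_max_coins_alt_eq (board : List (List Int)) (hb : board ≠ []) :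
    get_max_coins_alt board
      = pvV (pvCell board board.length) (max board.length (board.headI).length) 0 0 := by
  have hn : 0 < max board.length (board.headI).length := by
    cases board with
    | nil => exact absurd rfl hb
    | cons r t => simp [Nat.lt_of_lt_of_le (Nat.succ_pos t.length) (Nat.le_max_left _ _)]
  show (pvDP board board.length (max board.length (board.headI).length)
      (max board.length (board.headI).length)
      (List.replicate (max board.length (board.headI).length) 0)).headI = _
  rw [pvDP_eq board board.length (max board.length (board.headI).length) hn _ _ le_rfl
    (fun h => absurd h (lt_irrefl _))]
  obtain ⟨m, hm⟩ : ∃ m, max board.length (board.headI).length = m + 1 :=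
    ⟨_, (Nat.succ_pred_eq_of_pos hn).symm⟩
  rw [hm, List.range_succ_eq_map, List.map_cons, List.headI_cons]

-- structural facts about the padded board under Pre_
theorem getD_map_of_lt {α β : Type} (f : α → β) (l : List α) (i : Nat) (d : α) (d' : β)
    (h : i < l.length) : (l.map f).getD i d' = f (l.getD i d) := by
  rw [List.getD_eq_getElem _ _ (by simpa using h), List.getD_eq_getElem _ _ h, List.getElem_map]

theorem getD_replicate_zero (m i : Nat) : (List.replicate m (0 : Int)).getD i 0 = 0 := by
  simp [List.getD, List.getElem?_replicate]
  split <;> rfl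

theorem pad_facts (board : List (List Int)) (hb : board ≠ [])
    (hpre : ∀ row ∈ board, (board.headI).length ≤ row.length) :
    (pvPad board board.length (board.headI).length).length
        = max board.length (board.headI).length ∧
    ((pvPad board board.length (board.headI).length).headI).length
        = max board.length (board.headI).length ∧
    (∀ i, i < max board.length (board.headI).length →
      max board.length (board.headI).length
        ≤ ((pvPad board board.length (board.headI).length).getD i []).length) ∧
    (∀ i j, i < max board.length (board.headI).length →
        j < max board.length (board.headI).length →
      ((pvPad board board.length (board.headI).length).getD i []).getD j 0
        = pvCell board board.length i j) := by
  obtain ⟨r0, rest, rfl⟩ : ∃ r0 rest, board = r0 :: rest := by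
    cases board with
    | nil => exact absurd rfl hb
    | cons r t => exact ⟨r, t, rfl⟩
  simp only [List.headI_cons] at hpre ⊢
  rw [pvPad_eq _ _ _ rfl]
  by_cases hcase : r0.length < (r0 :: rest).length
  · -- more rows than columns: each row padded with zeros on the right
    have hmax : max (r0 :: rest).length r0.length = (r0 :: rest).length := by omega
    rw [if_pos hcase, hmax]
    have hrowlen : ∀ i, i < (r0 :: rest).length →
        (r0 :: rest).length ≤ (((r0 :: rest).map
          (· ++ List.replicate ((r0 :: rest).length - r0.length) 0)).getD i []).length := by
      intro i hi
      rw [getD_map_of_lt _ _ _ [] _ hi, List.length_append, List.length_replicate]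
      have : r0.length ≤ ((r0 :: rest).getD i []).length := by
        apply hpre
        rw [List.getD_eq_getElem _ _ hi]
        exact List.getElem_mem hi
      omega
    refine ⟨by simp, ?_, hrowlen, ?_⟩
    · simp only [List.map_cons, List.headI_cons, List.length_append, List.length_replicate]
      omega
    · intro i j hi hj
      rw [getD_map_of_lt _ _ _ [] _ hi]
      unfold pvCell
      rw [if_neg (by omega)]
      by_cases hjr : j < ((r0 :: rest).getD i []).length
      · rw [List.getD_append _ _ _ _ hjr, if_pos hjr]
      · rw [List.getD_append_right _ _ _ _ (by omega), if_neg hjr, getD_replicate_zero]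
  · -- at least as many columns as rows: zero rows appended at the bottom
    have hle : (r0 :: rest).length ≤ r0.length := by omega
    have hmax : max (r0 :: rest).length r0.length = r0.length := by omega
    rw [if_neg hcase, hmax]
    have hgetlow : ∀ i, i < (r0 :: rest).length →
        ((r0 :: rest) ++ List.replicate (r0.length - (r0 :: rest).length)
          (List.replicate r0.length 0)).getD i [] = (r0 :: rest).getD i [] := by
      intro i hi
      exact List.getD_append _ _ _ _ hi
    have hgethigh : ∀ i, (r0 :: rest).length ≤ i → i < r0.length →
        ((r0 :: rest) ++ List.replicate (r0.length - (r0 :: rest).length)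
          (List.replicate r0.length 0)).getD i [] = List.replicate r0.length 0 := by
      intro i hi1 hi2
      rw [List.getD_append_right _ _ _ _ (by omega)]
      rw [List.getD_eq_getElem _ _ (by rw [List.length_replicate]; omega), List.getElem_replicate]
    refine ⟨by rw [List.length_append, List.length_replicate]; omega, by simp, ?_, ?_⟩
    · intro i hi
      by_cases hlow : i < (r0 :: rest).length
      · rw [hgetlow i hlow]
        apply hpre
        rw [List.getD_eq_getElem _ _ hlow]
        exact List.getElem_mem hlow
      · rw [hgethigh i (by omega) hi, List.length_replicate]
    · intro i j hi hj
      by_cases hlow : i < (r0 :: rest).length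
      · rw [hgetlow i hlow]
        unfold pvCell
        rw [if_neg (by omega)]
        have hjr : j < ((r0 :: rest).getD i []).length := by
          have : r0.length ≤ ((r0 :: rest).getD i []).length := by
            apply hpre
            rw [List.getD_eq_getElem _ _ hlow]
            exact List.getElem_mem hlow
          omega
        rw [if_pos hjr]
      · rw [hgethigh i (by omega) hi, getD_replicate_zero]
        unfold pvCell
        rw [if_pos (by omega)]

-- ===== VERDICT (by name: the statement is the Claim_ definition above) =====
theorem get_max_coins_spec : Claim_equal_get_max_coins := by
  intro board hdom hpre
  obtain ⟨hb, hrows⟩ := hpre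
  unfold Spec_get_max_coins
  obtain ⟨r0, rest, rfl⟩ : ∃ r0 rest, board = r0 :: rest := by
    cases board with
    | nil => exact absurd rfl hb
    | cons r t => exact ⟨r, t, rfl⟩
  have hpf := pad_facts (r0 :: rest) hb hrows
  simp only [List.headI_cons] at hpf hrows
  have hn0 : 0 < max (r0 :: rest).length r0.length := by
    simp [Nat.lt_of_lt_of_le (Nat.succ_pos rest.length) (Nat.le_max_left _ _)]
  show (pvDriver (pvPad (r0 :: rest) (r0 :: rest).length r0.length) 0 0 0).getD 0 = _
  rw [pvDriver_eq _ _ hpf.1 hpf.2.1 hpf.2.2.1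
    ((max (r0 :: rest).length r0.length) + (max (r0 :: rest).length r0.length)) 0 0 0
    (by omega) hn0 hn0]
  simp only [Option.getD_some, zero_add]
  rw [get_max_coins_alt_eq _ hb]
  simp only [List.headI_cons]
  exact pvV_congr _ _ _ hpf.2.2.2 0 0 hn0 hn0
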